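-- pv_equiv track=rewrite | github.com/wayne-kirk-schmidt/sysaidpdfview | display.py | _extract_ticket_metadata
-- ===== SOURCE A (Python) =====
-- from typing import Any, Dict, List, Optional
--
-- Record = Dict[str, Any]  # expects: {"page": int, "key": str, "value": str}
--
-- def _extract_ticket_metadata(records: List[Record]) -> Dict[str, Optional[str]]:
--     """
--     Extract document-level ticket metadata.
--     Deterministic: first occurrence wins.
--     """
--     ticket_type: Optional[str] = None
--     ticket_number: Optional[str] = None
--
--     for r in records:
--         key = str(r.get("key", ""))
--         value = str(r.get("value", "")).strip()
--
--         if not ticket_type and key == "TicketType":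
--             ticket_type = value or None
--         elif not ticket_number and key == "TicketNumber":
--             ticket_number = value or None
--
--         if ticket_type and ticket_number:
--             break
--
--     return {
--         "type": ticket_type,
--         "number": ticket_number,
--     }
-- ===== SOURCE B (Python) =====
-- from typing import Any, Dict, List, Optional
--
-- Record = Dict[str, Any]
--
-- def _extract_ticket_metadata(records: List[Record]) -> Dict[str, Optional[str]]:
--     ticket_type = next((s for r in records
--                         if str(r.get("key", "")) == "TicketType"
--                         and (s := str(r.get("value", "")).strip())), None)
--     ticket_number = next((s for r in records
--                           if str(r.get("key", "")) == "TicketNumber"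
--                           and (s := str(r.get("value", "")).strip())), None)
--     return {"type": ticket_type, "number": ticket_number}
-- ===== Notes on version B (the rewrite author's own statement) =====
-- stated objective: idiomatic
-- what changed: Replaces A's single stateful loop with early break and 'value or None' accumulators by two independent first-truthy-value searches (next over a generator per field), assembling the result dict directly.
import Mathlib
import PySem

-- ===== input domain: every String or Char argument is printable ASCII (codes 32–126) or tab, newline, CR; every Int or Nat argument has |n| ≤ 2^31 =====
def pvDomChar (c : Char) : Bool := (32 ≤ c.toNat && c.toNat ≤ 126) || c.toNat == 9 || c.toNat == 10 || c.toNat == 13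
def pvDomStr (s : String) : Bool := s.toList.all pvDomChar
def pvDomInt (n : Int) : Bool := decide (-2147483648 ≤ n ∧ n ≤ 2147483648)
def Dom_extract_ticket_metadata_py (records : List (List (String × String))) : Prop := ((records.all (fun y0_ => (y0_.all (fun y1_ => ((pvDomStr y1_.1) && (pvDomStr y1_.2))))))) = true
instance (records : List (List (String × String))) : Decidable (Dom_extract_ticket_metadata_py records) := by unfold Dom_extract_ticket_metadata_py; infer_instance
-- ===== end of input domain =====

-- ===== PORT A =====
-- B changes the decomposition: independent first-truthy searches per field instead of one shared stateful loop (objective: idiomatic).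
-- Python truthiness of an Optional[str]: None and "" are falsy.
def pvTruthy (o : Option String) : Bool :=
  match o with
  | none => false
  | some s => !(s == "")

-- r.get(k, "") on the record dict
def pvGetS (r : List (String × String)) (k : String) : String :=
  (PySem.Dict.mk r).getD k ""

-- A's loop: state (ticket_type, ticket_number), early break when both truthy
def pvLoopA : List (List (String × String)) → Option String → Option String → Option String × Option String
  | [], tt, tn => (tt, tn)
  | r :: rest, tt, tn =>
    let key := pvGetS r "key"
    let value := PySem.Str.strip (pvGetS r "value")
    let st :=
      if !(pvTruthy tt) && (key == "TicketType") then
        ((if value == "" then none else some value), tn)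
      else if !(pvTruthy tn) && (key == "TicketNumber") then
        (tt, (if value == "" then none else some value))
      else (tt, tn)
    if pvTruthy st.1 && pvTruthy st.2 then st
    else pvLoopA rest st.1 st.2

def extract_ticket_metadata_py (records : List (List (String × String))) : List (String × Option String) :=
  let st := pvLoopA records none none
  [("type", st.1), ("number", st.2)]

-- ===== PORT B =====
-- one generator step: the record's contribution for key k, if its stripped value is truthy
def pvPick (r : List (String × String)) (k : String) : Option String :=
  if pvGetS r "key" == k then
    let s := PySem.Str.strip (pvGetS r "value")
    if s == "" then none else some s
  else none

-- next((s for r in records if ... == k and (s := ...strip())), None)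
def pvFirst (records : List (List (String × String))) (k : String) : Option String :=
  records.findSome? (fun r => pvPick r k)

def extract_ticket_metadata_py_alt (records : List (List (String × String))) : List (String × Option String) :=
  [("type", pvFirst records "TicketType"), ("number", pvFirst records "TicketNumber")]

-- ===== PRECONDITION & SPEC =====
def Spec_extract_ticket_metadata_py (records : List (List (String × String))) (out : List (String × Option String)) : Prop := out = extract_ticket_metadata_py_alt records
instance (records : List (List (String × String))) (out : List (String × Option String)) : Decidable (Spec_extract_ticket_metadata_py records out) := by unfold Spec_extract_ticket_metadata_py; infer_instance

-- ===== CLAIM (what is proved, stated in full; the proofs are below) =====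
def Claim_equal_extract_ticket_metadata_py : Prop := ∀ (records : List (List (String × String))), Dom_extract_ticket_metadata_py records → Spec_extract_ticket_metadata_py records (extract_ticket_metadata_py records)

-- ===== LEMMAS AND PROOFS =====

-- states reachable by A's loop: the slot is none or holds a nonempty string,
-- so Python truthiness coincides with Option.isSome
def pvOk (o : Option String) : Prop := pvTruthy o = o.isSome

lemma pvOk_none : pvOk none := rfl

lemma pvOk_upd (v : String) : pvOk (if v == "" then none else some v) := by
  by_cases h : v = "" <;> simp [pvOk, pvTruthy, h]

lemma pvOk_falsy (o : Option String) (h : pvOk o) (hf : pvTruthy o = false) : o = none := by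
  cases o <;> simp_all [pvOk]

lemma pvOk_truthy (o : Option String) (h : pvTruthy o = true) (x : Option String) :
    o.or x = o := by
  cases o <;> simp_all [pvTruthy]

lemma pvPick_ne (r : List (String × String)) (k : String)
    (h : (pvGetS r "key" == k) = false) : pvPick r k = none := by
  simp [pvPick, h]

lemma pvAbsorb (o : Option String) (r : List (String × String)) (k : String)
    (h : pvOk o) (hc : (!(pvTruthy o) && (pvGetS r "key" == k)) = false) :
    o.or (pvPick r k) = o := by
  by_cases ht : pvTruthy o = true
  · exact pvOk_truthy o ht _
  · have hb : (pvGetS r "key" == k) = false := by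
      simp at hc ⊢
      simpa [Bool.eq_false_iff.mpr ht] using hc
    rw [pvPick_ne r k hb]
    cases o <;> rfl

lemma pvFirst_cons (r : List (String × String)) (rest : List (List (String × String))) (k : String) :
    pvFirst (r :: rest) k = (pvPick r k).or (pvFirst rest k) := by
  simp [pvFirst, List.findSome?_cons]
  cases pvPick r k <;> simp

lemma pvLoopA_eq (l : List (List (String × String))) :
    ∀ tt tn, pvOk tt → pvOk tn →
      pvLoopA l tt tn = (tt.or (pvFirst l "TicketType"), tn.or (pvFirst l "TicketNumber")) := by
  induction l with
  | nil => intro tt tn htt htn; simp [pvLoopA, pvFirst]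
  | cons r rest ih =>
    intro tt tn htt htn
    have step : ∀ tt' tn', pvOk tt' → pvOk tn' →
        (if pvTruthy tt' && pvTruthy tn' then (tt', tn')
         else pvLoopA rest tt' tn') =
        (tt'.or (pvFirst rest "TicketType"), tn'.or (pvFirst rest "TicketNumber")) := by
      intro tt' tn' h1 h2
      by_cases hb : (pvTruthy tt' && pvTruthy tn') = true
      · obtain ⟨b1, b2⟩ := Bool.and_eq_true_iff.mp hb
        rw [if_pos hb, pvOk_truthy tt' b1, pvOk_truthy tn' b2]
      · rw [if_neg hb]; exact ih tt' tn' h1 h2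
    rw [pvFirst_cons, pvFirst_cons]
    simp only [pvLoopA]
    by_cases h1 : (!(pvTruthy tt) && (pvGetS r "key" == "TicketType")) = true
    · obtain ⟨h1a, h1b⟩ := Bool.and_eq_true_iff.mp h1
      have htt0 : tt = none := pvOk_falsy tt htt (Bool.not_eq_true' .. ▸ h1a)
      rw [if_pos h1,
          step _ tn (pvOk_upd _) htn, htt0]
      have hk : pvGetS r "key" = "TicketType" := by simpa using h1b
      have hN : pvPick r "TicketNumber" = none := pvPick_ne r _ (by simp [hk])
      have hT : pvPick r "TicketType"
          = (if PySem.Str.strip (pvGetS r "value") == "" then none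
             else some (PySem.Str.strip (pvGetS r "value"))) := by
        simp [pvPick, hk]
      rw [hT, hN]
      simp
    · rw [if_neg h1]
      by_cases h2 : (!(pvTruthy tn) && (pvGetS r "key" == "TicketNumber")) = true
      · obtain ⟨h2a, h2b⟩ := Bool.and_eq_true_iff.mp h2
        have htn0 : tn = none := pvOk_falsy tn htn (Bool.not_eq_true' .. ▸ h2a)
        rw [if_pos h2, step tt _ htt (pvOk_upd _), htn0]
        have hk : pvGetS r "key" = "TicketNumber" := by simpa using h2b
        have hN : pvPick r "TicketNumber"
            = (if PySem.Str.strip (pvGetS r "value") == "" then none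
               else some (PySem.Str.strip (pvGetS r "value"))) := by
          simp [pvPick, hk]
        rw [hN, ← Option.or_assoc,
            pvAbsorb tt r "TicketType" htt (Bool.eq_false_iff.mpr h1)]
        simp
      · rw [if_neg h2, step tt tn htt htn, ← Option.or_assoc, ← Option.or_assoc,
            pvAbsorb tt r "TicketType" htt (Bool.eq_false_iff.mpr h1),
            pvAbsorb tn r "TicketNumber" htn (Bool.eq_false_iff.mpr h2)]

-- ===== VERDICT (by name: the statement is the Claim_ definition above) =====
theorem extract_ticket_metadata_py_spec : Claim_equal_extract_ticket_metadata_py := by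
  intro records _
  unfold Spec_extract_ticket_metadata_py extract_ticket_metadata_py extract_ticket_metadata_py_alt
  rw [pvLoopA_eq records none none pvOk_none pvOk_none]
  simp [Option.or]
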